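-- pv_equiv track=rewrite | github.com/matwerner/fgv-lp | 2024_2/projeto_similaridade_de_documentos/versao_antiga/main.py | bag_of_words
-- ===== SOURCE A (Python) =====
-- def bag_of_words(texto: str, vocab: dict[str, int]):
--     """Converte um texto na sua representação Bag-of-Words"""
--     # Divido em palavras
--     palavras = texto.split()
--
--     # Vetor ocorrencias das palvras
--     vetor = [0] * len(vocab)
--
--     # Mapear palvras no vetor
--     for palavra in palavras:
--         index = vocab.get(palavra, -1)
--         if index < 0:
--             continue
--         vetor[index] += 1
--
--     return vetor
-- ===== SOURCE B (Python) =====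
-- def bag_of_words(texto: str, vocab: dict[str, int]):
--     """Converte um texto na sua representacao Bag-of-Words"""
--     # Frequency table of the words, built once
--     counts = {}
--     for w in texto.split():
--         counts[w] = counts.get(w, 0) + 1
--     # Fill the vector by iterating the vocabulary and looking up the counts
--     vetor = [0] * len(vocab)
--     for palavra, index in vocab.items():
--         if index >= 0 and palavra in counts:
--             vetor[index] += counts[palavra]
--     return vetor
-- ===== Notes on version B (the rewrite author's own statement) =====
-- stated objective: alternative
-- what changed: B inverts the traversal: it aggregates the text into a frequency table once, then iterates the vocabulary and adds each word's count, instead of iterating the words and bumping the vector per occurrence.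
import Mathlib
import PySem

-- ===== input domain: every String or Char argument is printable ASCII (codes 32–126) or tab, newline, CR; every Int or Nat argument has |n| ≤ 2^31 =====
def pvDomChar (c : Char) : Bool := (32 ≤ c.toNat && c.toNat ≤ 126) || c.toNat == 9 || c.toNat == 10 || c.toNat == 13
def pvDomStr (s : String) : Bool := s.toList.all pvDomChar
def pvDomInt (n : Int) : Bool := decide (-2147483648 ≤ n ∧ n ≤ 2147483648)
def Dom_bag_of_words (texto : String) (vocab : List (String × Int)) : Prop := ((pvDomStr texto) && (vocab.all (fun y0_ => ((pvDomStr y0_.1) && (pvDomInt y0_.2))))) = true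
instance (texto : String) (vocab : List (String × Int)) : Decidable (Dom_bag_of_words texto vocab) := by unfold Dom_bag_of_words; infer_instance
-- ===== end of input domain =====

-- B inverts the traversal (frequency table first, then one pass over the vocabulary); same cost, proved equal on Pre_.

-- ===== PORT A =====
-- vocab.get(palavra, -1): first-match lookup in the dict
def bowLookup (vocab : List (String × Int)) (w : String) : Int :=
  ((PySem.Dict.mk vocab).get? w).getD (-1)

-- one iteration of A's loop body
def bowStepA (vocab : List (String × Int)) (vetor : List Int) (palavra : String) : List Int :=
  if bowLookup vocab palavra < 0 then vetor
  else PySem.List.pySetD vetor (bowLookup vocab palavra)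
    (PySem.List.pyGetD vetor (bowLookup vocab palavra) 0 + 1)

def bag_of_words (texto : String) (vocab : List (String × Int)) : List Int :=
  (PySem.Str.split₀ texto).foldl (bowStepA vocab)
    (List.replicate (PySem.Dict.size (PySem.Dict.mk vocab)) (0 : Int))

-- ===== PORT B =====
-- one iteration of B's vocabulary loop body
def bowStepB (counts : PySem.Dict String Int) (vetor : List Int) (p : String × Int) : List Int :=
  if 0 ≤ p.2 ∧ counts.contains p.1 then
    PySem.List.pySetD vetor p.2 (PySem.List.pyGetD vetor p.2 0 + counts.getD p.1 0)
  else vetor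

def bag_of_words_alt (texto : String) (vocab : List (String × Int)) : List Int :=
  (PySem.Dict.mk vocab).items.foldl
    (bowStepB ((PySem.Str.split₀ texto).foldl
      (fun d w => d.insert w (d.getD w 0 + 1)) PySem.Dict.empty))
    (List.replicate (PySem.Dict.size (PySem.Dict.mk vocab)) (0 : Int))

-- ===== PRECONDITION & SPEC =====
-- Pre_ excludes (a) association lists with duplicate keys, which are not a faithful representation of the
-- Python dict argument (lookup/len are ambiguous there), and (b) inputs where some word of the text maps to
-- an index ≥ len(vocab), on which A raises IndexError.
def Pre_bag_of_words (texto : String) (vocab : List (String × Int)) : Prop :=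
  (vocab.map Prod.fst).Nodup ∧
  ∀ p ∈ vocab, p.1 ∈ PySem.Str.split₀ texto → p.2 < (vocab.length : Int)
instance (texto : String) (vocab : List (String × Int)) : Decidable (Pre_bag_of_words texto vocab) := by unfold Pre_bag_of_words; infer_instance

def pvWitness_bag_of_words : String × (List (String × Int)) := ("a b a", [("a", 0), ("c", 1)])

def Spec_bag_of_words (texto : String) (vocab : List (String × Int)) (out : List Int) : Prop := out = bag_of_words_alt texto vocab
instance (texto : String) (vocab : List (String × Int)) (out : List Int) : Decidable (Spec_bag_of_words texto vocab out) := by unfold Spec_bag_of_words; infer_instance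

-- ===== CLAIM (what is proved, stated in full; the proofs are below) =====
def Claim_equal_bag_of_words : Prop := ∀ (texto : String) (vocab : List (String × Int)), Dom_bag_of_words texto vocab → Pre_bag_of_words texto vocab → Spec_bag_of_words texto vocab (bag_of_words texto vocab)

-- ===== LEMMAS AND PROOFS =====

theorem countP_split {α : Type} [DecidableEq α] (ws : List α) (k : α) (p : α → Bool) :
    ws.countP p = (if p k then ws.count k else 0) + ws.countP (fun w => !(w == k) && p w) := by
  induction ws with
  | nil => simp
  | cons a t ih =>
    by_cases hak : a = k <;> by_cases hp : p a <;>
      simp [List.countP_cons, List.count_cons, hak, hp, ih] <;> split_ifs <;> omega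

-- A's per-word vector value at index j
theorem stepA_getD (vocab : List (String × Int)) (v : List Int) (w : String) (j : Nat)
    (hj : j < v.length) (hb : 0 ≤ bowLookup vocab w → bowLookup vocab w < (v.length : Int)) :
    PySem.List.pyGetD (bowStepA vocab v w) (j : Int) 0 =
      PySem.List.pyGetD v (j : Int) 0 + (if bowLookup vocab w = (j : Int) then 1 else 0) := by
  unfold bowStepA
  by_cases hneg : bowLookup vocab w < 0
  · have : ¬ bowLookup vocab w = (j : Int) := by omega
    simp [hneg, this]
  · have h0 : 0 ≤ bowLookup vocab w := by omega
    have hlt := hb h0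
    have hcast : bowLookup vocab w = ((bowLookup vocab w).toNat : Int) := by omega
    have hlen : (bowLookup vocab w).toNat < v.length := by omega
    rw [if_neg hneg, hcast, PySem.List.pyGetD_pySetD_natCast _ _ _ _ _ hlen]
    by_cases hje : j = (bowLookup vocab w).toNat
    · rw [if_pos (show ((bowLookup vocab w).toNat : Int) = (j : Int) by omega), hje, if_pos rfl]
    · rw [if_neg (show ¬ ((bowLookup vocab w).toNat : Int) = (j : Int) by omega)]
      omega

theorem stepA_length (vocab : List (String × Int)) (v : List Int) (w : String) :
    (bowStepA vocab v w).length = v.length := by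
  unfold bowStepA
  split <;> simp [PySem.List.length_pySetD]

theorem foldA_length (vocab : List (String × Int)) (ws : List String) (v : List Int) :
    (ws.foldl (bowStepA vocab) v).length = v.length := by
  induction ws generalizing v with
  | nil => rfl
  | cons w t ih => simp [List.foldl_cons, ih, stepA_length]

theorem foldA_getD (vocab : List (String × Int)) (ws : List String) (v : List Int) (j : Nat)
    (hj : j < v.length)
    (hb : ∀ w ∈ ws, 0 ≤ bowLookup vocab w → bowLookup vocab w < (v.length : Int)) :
    PySem.List.pyGetD (ws.foldl (bowStepA vocab) v) (j : Int) 0 =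
      PySem.List.pyGetD v (j : Int) 0 + (ws.countP (fun w => bowLookup vocab w == (j : Int)) : Int) := by
  induction ws generalizing v with
  | nil => simp
  | cons w t ih =>
    have hlen := stepA_length vocab v w
    rw [List.foldl_cons, ih (bowStepA vocab v w) (by omega)
        (fun x hx h0 => by rw [hlen]; exact hb x (List.mem_cons_of_mem _ hx) h0)]
    rw [stepA_getD vocab v w j hj (hb w (List.mem_cons_self) )]
    rw [List.countP_cons]
    by_cases h : bowLookup vocab w = (j : Int) <;> simp [h] <;> push_cast <;> ring

-- B's per-entry vector value at index j
theorem stepB_getD (counts : PySem.Dict String Int) (v : List Int) (p : String × Int) (j : Nat)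
    (hj : j < v.length)
    (hb : 0 ≤ p.2 → counts.contains p.1 → p.2 < (v.length : Int)) :
    PySem.List.pyGetD (bowStepB counts v p) (j : Int) 0 =
      PySem.List.pyGetD v (j : Int) 0 + (if p.2 = (j : Int) then counts.getD p.1 0 else 0) := by
  unfold bowStepB
  by_cases hc : 0 ≤ p.2 ∧ counts.contains p.1
  · have hlt := hb hc.1 hc.2
    have hcast : p.2 = (p.2.toNat : Int) := by omega
    have hlen : p.2.toNat < v.length := by omega
    rw [if_pos hc, hcast, PySem.List.pyGetD_pySetD_natCast _ _ _ _ _ hlen]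
    by_cases hje : j = p.2.toNat
    · rw [if_pos (show ((p.2.toNat : Nat) : Int) = (j : Int) by omega), hje, if_pos rfl]
    · rw [if_neg (show ¬ ((p.2.toNat : Nat) : Int) = (j : Int) by omega)]
      omega
  · rw [if_neg hc]
    rcases Decidable.not_and_iff_not_or_not.mp hc with h | h
    · have : ¬ p.2 = (j : Int) := by omega
      simp [this]
    · by_cases hje : p.2 = (j : Int)
      · rw [PySem.Dict.getD_of_not_contains counts 0 (by simpa using h)]
        simp [hje]
      · simp [hje]

theorem stepB_length (counts : PySem.Dict String Int) (v : List Int) (p : String × Int) :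
    (bowStepB counts v p).length = v.length := by
  unfold bowStepB; split <;> simp [PySem.List.length_pySetD]

theorem foldB_length (counts : PySem.Dict String Int) (vs : List (String × Int)) (v : List Int) :
    (vs.foldl (bowStepB counts) v).length = v.length := by
  induction vs generalizing v with
  | nil => rfl
  | cons p t ih => simp [List.foldl_cons, ih, stepB_length]

theorem foldB_getD (counts : PySem.Dict String Int) (vs : List (String × Int)) (v : List Int) (j : Nat)
    (hj : j < v.length)
    (hb : ∀ p ∈ vs, 0 ≤ p.2 → counts.contains p.1 → p.2 < (v.length : Int)) :
    PySem.List.pyGetD (vs.foldl (bowStepB counts) v) (j : Int) 0 =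
      PySem.List.pyGetD v (j : Int) 0 +
        ((vs.map (fun p => if p.2 = (j : Int) then counts.getD p.1 0 else 0)).sum) := by
  induction vs generalizing v with
  | nil => simp
  | cons p t ih =>
    have hlen := stepB_length counts v p
    rw [List.foldl_cons, ih (bowStepB counts v p) (by omega)
        (fun q hq h0 hcq => by rw [hlen]; exact hb q (List.mem_cons_of_mem _ hq) h0 hcq)]
    rw [stepB_getD counts v p j hj (hb p (List.mem_cons_self))]
    simp; ring

theorem lookup_cons (k : String) (i : Int) (rest : List (String × Int)) (w : String) :
    bowLookup ((k, i) :: rest) w = if w = k then i else bowLookup rest w := by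
  by_cases h : w = k
  · rw [if_pos h]
    unfold bowLookup PySem.Dict.get?
    rw [List.find?_cons_of_pos (by simp [h])]
    rfl
  · rw [if_neg h]
    unfold bowLookup PySem.Dict.get?
    rw [List.find?_cons_of_neg (by simp; exact fun hk => (h hk.symm).elim)]

theorem lookup_none_of_not_mem (rest : List (String × Int)) (k : String)
    (hk : k ∉ rest.map Prod.fst) : bowLookup rest k = -1 := by
  have : (PySem.Dict.mk rest).get? k = none := by
    rw [PySem.Dict.get?_eq_none_iff_not_mem_keys]
    simpa [PySem.Dict.keys, PySem.Dict.items] using hk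
  simp [bowLookup, this]

-- the counting identity: per-occurrence counting over the words = per-vocabulary-entry counts
theorem count_identity (ws : List String) (vs : List (String × Int)) (j : Nat)
    (hnd : (vs.map Prod.fst).Nodup) :
    (ws.countP (fun w => bowLookup vs w == (j : Int)) : Int) =
      ((vs.map (fun p => if p.2 = (j : Int) then ((ws.count p.1 : Nat) : Int) else 0)).sum) := by
  induction vs with
  | nil =>
    have : ∀ w ∈ ws, ¬ (bowLookup [] w == (j : Int)) = true := by
      intro w _
      simp [bowLookup, PySem.Dict.get?]
    simp [List.countP_eq_zero.mpr this]
  | cons p t ih =>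
    obtain ⟨k, i⟩ := p
    have hnd' : (t.map Prod.fst).Nodup := (List.nodup_cons.mp hnd).2
    have hknot : k ∉ t.map Prod.fst := (List.nodup_cons.mp hnd).1
    have hk1 : bowLookup ((k, i) :: t) k = i := by simp [lookup_cons]
    have hk2 : bowLookup t k = -1 := lookup_none_of_not_mem t k hknot
    have hk2' : ¬ (bowLookup t k == (j : Int)) = true := by simp [hk2]
    have hfe : (fun w => !(w == k) && (bowLookup ((k, i) :: t) w == (j : Int)))
             = (fun w => !(w == k) && (bowLookup t w == (j : Int))) := by
      funext w
      by_cases h : w = k <;> simp [h, lookup_cons]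
    have htail : ws.countP (fun w => bowLookup t w == (j : Int))
        = ws.countP (fun w => !(w == k) && (bowLookup t w == (j : Int))) := by
      rw [countP_split ws k (fun w => bowLookup t w == (j : Int)), if_neg hk2', Nat.zero_add]
    rw [countP_split ws k (fun w => bowLookup ((k, i) :: t) w == (j : Int)), hfe, ← htail, hk1]
    simp only [List.map_cons, List.sum_cons]
    rw [← ih hnd']
    by_cases hij : i = (j : Int)
    · rw [if_pos (by simpa using hij), if_pos hij]
      push_cast
      omega
    · rw [if_neg (by simpa using hij), if_neg hij]
      push_cast
      omega

-- bounds from Pre_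
theorem boundA (texto : String) (vocab : List (String × Int))
    (hpre : Pre_bag_of_words texto vocab) :
    ∀ w ∈ PySem.Str.split₀ texto, 0 ≤ bowLookup vocab w →
      bowLookup vocab w < (vocab.length : Int) := by
  intro w hw h0
  rcases hv : (PySem.Dict.mk vocab).get? w with _ | i
  · simp [bowLookup, hv] at h0
  · have hm : (w, i) ∈ vocab := PySem.Dict.mem_items_of_get?_eq_some _ hv
    have := hpre.2 (w, i) hm hw
    simpa [bowLookup, hv] using this

theorem bag_of_words_agree (texto : String) (vocab : List (String × Int))
    (hpre : Pre_bag_of_words texto vocab) :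
    bag_of_words texto vocab = bag_of_words_alt texto vocab := by
  unfold bag_of_words bag_of_words_alt
  rw [PySem.Dict.foldl_insert_getD_add_one_eq_counter]
  have hitems : (PySem.Dict.mk vocab).items = vocab := rfl
  have hsize : PySem.Dict.size (PySem.Dict.mk vocab) = vocab.length := rfl
  rw [hitems, hsize]
  have hgd : ∀ (l : List Int) {m : Nat} (h : m < l.length),
      PySem.List.pyGetD l (m : Int) 0 = l[m] := by
    intro l m h
    rw [PySem.List.pyGetD_natCast, List.getD_eq_getElem l 0 h]
  apply List.ext_getElem
  · rw [foldA_length, foldB_length]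
  intro j hja hjb
  have hjn : j < vocab.length := by rw [foldA_length] at hja; simpa using hja
  rw [← hgd _ hja, ← hgd _ hjb]
  rw [foldA_getD vocab _ _ j (by simpa using hjn) (by simpa using boundA texto vocab hpre)]
  rw [foldB_getD (PySem.Dict.counter (PySem.Str.split₀ texto)) vocab _ j (by simpa using hjn)
    (by
      intro p hp h0 hc
      rw [PySem.Dict.contains_counter] at hc
      have hwmem : p.1 ∈ PySem.Str.split₀ texto := by simpa using hc
      simpa using hpre.2 p hp hwmem)]
  rw [count_identity (PySem.Str.split₀ texto) vocab j hpre.1]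
  congr 1
  apply congrArg
  apply List.map_congr_left
  intro p _
  by_cases hij : p.2 = (j : Int) <;> simp [hij, PySem.Dict.getD_counter]

-- ===== VERDICT (by name: the statement is the Claim_ definition above) =====
theorem bag_of_words_spec : Claim_equal_bag_of_words := by
  intro texto vocab _ hpre
  unfold Spec_bag_of_words
  exact bag_of_words_agree texto vocab hpre
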